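-- pv_equiv track=rewrite | github.com/vigneshsabapathi/python-algorithms | ciphers/fractionated_morse_cipher_optimized.py | encrypt_v2
-- ===== SOURCE A (Python) =====
-- import string
--
-- MORSE_CODE_DICT: dict[str, str] = {
--     "A": ".-",   "B": "-...", "C": "-.-.", "D": "-..",  "E": ".",
--     "F": "..-.", "G": "--.",  "H": "....", "I": "..",   "J": ".---",
--     "K": "-.-",  "L": ".-..", "M": "--",   "N": "-.",   "O": "---",
--     "P": ".--.", "Q": "--.-", "R": ".-.",  "S": "...",  "T": "-",
--     "U": "..-",  "V": "...-", "W": ".--",  "X": "-..-", "Y": "-.--",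
--     "Z": "--..",  " ": "",
-- }
--
-- MORSE_COMBINATIONS: list[str] = [
--     "...", "..-", "..x", ".-.", ".--", ".-x", ".x.", ".x-", ".xx",
--     "-..", "-.-", "-.x", "--.", "---", "--x", "-x.", "-x-", "-xx",
--     "x..", "x.-", "x.x", "x-.", "x--", "x-x", "xx.", "xx-", "xxx",
-- ]
--
-- def _build_key_alphabet(key: str) -> str:
--     k = key.upper() + string.ascii_uppercase
--     return "".join(sorted(set(k), key=k.find))
--
-- def _to_morse(plaintext: str) -> str:
--     return "x".join(MORSE_CODE_DICT.get(ch.upper(), "") for ch in plaintext)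
--
-- def encrypt_v2(plaintext: str, key: str) -> str:
--     morse = _to_morse(plaintext)
--     key_alpha = _build_key_alphabet(key)
--     padding = (-len(morse)) % 3
--     morse += "x" * padding
--     t_map = {v: k for k, v in zip(key_alpha, MORSE_COMBINATIONS)}
--     t_map["xxx"] = ""
--     result = []
--     for i in range(0, len(morse), 3):
--         result.append(t_map[morse[i:i+3]])
--     return "".join(result)
-- ===== SOURCE B (Python) =====
-- import string
--
-- _MORSE = {
--     "A": ".-",   "B": "-...", "C": "-.-.", "D": "-..",  "E": ".",
--     "F": "..-.", "G": "--.",  "H": "....", "I": "..",   "J": ".---",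
--     "K": "-.-",  "L": ".-..", "M": "--",   "N": "-.",   "O": "---",
--     "P": ".--.", "Q": "--.-", "R": ".-.",  "S": "...",  "T": "-",
--     "U": "..-",  "V": "...-", "W": ".--",  "X": "-..-", "Y": "-.--",
--     "Z": "--..",  " ": "",
-- }
--
-- def encrypt_v2(plaintext: str, key: str) -> str:
--     # Streaming state machine: never builds the morse string.  Each morse symbol
--     # is fed as a base-3 digit ('.'=0, '-'=1, 'x'=2) into a 3-digit accumulator;
--     # a completed triple immediately emits one letter of the keyed alphabet
--     # (value 26, i.e. 'xxx', emits nothing).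
--     alpha = "".join(dict.fromkeys(key.upper() + string.ascii_uppercase))
--     out = []
--     acc = 0   # value of the pending digits, base 3
--     n = 0     # how many digits are pending (0..2)
--
--     def emit(d):
--         nonlocal acc, n
--         acc = acc * 3 + d
--         n += 1
--         if n == 3:
--             if acc != 26:
--                 out.append(alpha[acc])
--             acc = 0
--             n = 0
--
--     started = False
--     for ch in plaintext:
--         if started:
--             emit(2)                       # the 'x' separator between letters
--         for sym in _MORSE.get(ch.upper(), ""):
--             emit(0 if sym == "." else 1)
--         started = True
--     while n:                              # flush: pad the last group with 'x'
--         emit(2)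
--     return "".join(out)
-- ===== Notes on version B (the rewrite author's own statement) =====
-- stated objective: alternative
-- what changed: B replaces A's staged pipeline (materialise the full morse string, pad it, slice it into 3-char chunks, look each chunk up in a prebuilt MORSE_COMBINATIONS->letter dict) with a single streaming pass: each morse symbol is fed as a base-3 digit into a 3-digit accumulator that emits a keyed-alphabet letter the moment a triple completes, padding falling out of a final flush; no morse string, combination table or translation dict is ever built, and the keyed alphabet comes from dict.fromkeys instead of sorted(set(k), key=k.find).
import Mathlib
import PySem

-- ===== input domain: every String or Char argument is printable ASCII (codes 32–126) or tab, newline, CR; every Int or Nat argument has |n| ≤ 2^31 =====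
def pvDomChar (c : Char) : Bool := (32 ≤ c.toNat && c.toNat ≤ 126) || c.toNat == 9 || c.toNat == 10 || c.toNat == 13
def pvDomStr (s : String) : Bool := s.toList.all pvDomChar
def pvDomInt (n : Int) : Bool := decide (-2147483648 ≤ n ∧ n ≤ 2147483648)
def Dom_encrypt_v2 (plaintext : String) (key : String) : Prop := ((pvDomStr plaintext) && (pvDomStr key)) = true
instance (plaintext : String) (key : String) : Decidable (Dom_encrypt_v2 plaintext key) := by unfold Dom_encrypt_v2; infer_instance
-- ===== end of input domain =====

-- B replaces A's staged pipeline (build the whole morse string, pad it, slice it into 3-char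
-- groups, look each group up in a prebuilt trigram dict) by one streaming pass: each morse
-- symbol is fed as a base-3 digit into a 3-digit accumulator that emits a key-alphabet letter
-- whenever a triple completes; no morse string, combination table or dict is ever built.
-- Objective: alternative (same O(n) cost, different algorithmic structure).

-- ===== PORT A =====
-- MORSE_CODE_DICT (module constant, used by both sources)
def pvMorseDict : PySem.Dict (List Char) (List Char) := ⟨[(['A'], ['.', '-']),
  (['B'], ['-', '.', '.', '.']),
  (['C'], ['-', '.', '-', '.']),
  (['D'], ['-', '.', '.']),
  (['E'], ['.']),
  (['F'], ['.', '.', '-', '.']),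
  (['G'], ['-', '-', '.']),
  (['H'], ['.', '.', '.', '.']),
  (['I'], ['.', '.']),
  (['J'], ['.', '-', '-', '-']),
  (['K'], ['-', '.', '-']),
  (['L'], ['.', '-', '.', '.']),
  (['M'], ['-', '-']),
  (['N'], ['-', '.']),
  (['O'], ['-', '-', '-']),
  (['P'], ['.', '-', '-', '.']),
  (['Q'], ['-', '-', '.', '-']),
  (['R'], ['.', '-', '.']),
  (['S'], ['.', '.', '.']),
  (['T'], ['-']),
  (['U'], ['.', '.', '-']),
  (['V'], ['.', '.', '.', '-']),
  (['W'], ['.', '-', '-']),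
  (['X'], ['-', '.', '.', '-']),
  (['Y'], ['-', '.', '-', '-']),
  (['Z'], ['-', '-', '.', '.']),
  ([' '], [])]⟩

-- string.ascii_uppercase
def pvAsciiUpper : List Char := ['A', 'B', 'C', 'D', 'E', 'F', 'G', 'H', 'I', 'J', 'K', 'L', 'M', 'N', 'O', 'P', 'Q', 'R', 'S', 'T', 'U', 'V', 'W', 'X', 'Y', 'Z']

-- MORSE_CODE_DICT.get(ch.upper(), "") (used by A's _to_morse and by B's inner loop)
def pvCode (ch : Char) : List Char := pvMorseDict.getD (PySem.Chars.upper [ch]) []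

-- _to_morse
def pvToMorse (p : List Char) : List Char :=
  PySem.Chars.join ['x'] (p.map pvCode)

-- MORSE_COMBINATIONS
def pvCombos : List (List Char) := [['.', '.', '.'],
  ['.', '.', '-'],
  ['.', '.', 'x'],
  ['.', '-', '.'],
  ['.', '-', '-'],
  ['.', '-', 'x'],
  ['.', 'x', '.'],
  ['.', 'x', '-'],
  ['.', 'x', 'x'],
  ['-', '.', '.'],
  ['-', '.', '-'],
  ['-', '.', 'x'],
  ['-', '-', '.'],
  ['-', '-', '-'],
  ['-', '-', 'x'],
  ['-', 'x', '.'],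
  ['-', 'x', '-'],
  ['-', 'x', 'x'],
  ['x', '.', '.'],
  ['x', '.', '-'],
  ['x', '.', 'x'],
  ['x', '-', '.'],
  ['x', '-', '-'],
  ['x', '-', 'x'],
  ['x', 'x', '.'],
  ['x', 'x', '-'],
  ['x', 'x', 'x']]

-- literal port of A.  The lookup t_map[morse[i:i+3]] is ported with getD: a KeyError is
-- unreachable because every 3-char group over {'.','-','x'} is a key of t_map.
def encrypt_v2 (plaintext : String) (key : String) : String :=
  let morse := pvToMorse plaintext.toList
  let k := PySem.Chars.upper key.toList ++ pvAsciiUpper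
  let keyAlpha := PySem.List.sorted (PySem.Set.ofList k) (fun c => PySem.Chars.find k [c]) false
  let padding := PySem.Int.mod (-(morse.length : Int)) 3
  let morse2 := morse ++ PySem.List.pyRepeat ['x'] padding
  let tmap := ((keyAlpha.zip pvCombos).foldl (fun d p => d.insert p.2 [p.1])
      (⟨[]⟩ : PySem.Dict (List Char) (List Char))).insert ['x', 'x', 'x'] []
  let result := (PySem.List.pyRange 0 (morse2.length : Int) 3).foldl
      (fun acc i => acc ++ [tmap.getD (PySem.List.slice morse2 (some i) (some (i + 3))) []]) []
  String.mk (PySem.Chars.join [] result)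

-- ===== PORT B =====
-- streaming state: (out, acc, n) = (emitted letters, value of pending digits, #pending digits)
-- emit(d): alpha[acc] is ported with pyGetD (an IndexError is unreachable: acc ≤ 25 < len(alpha))
def pvEmit (alpha : List Char) (s : List Char × Int × Nat) (d : Int) : List Char × Int × Nat :=
  let acc := s.2.1 * 3 + d
  let n := s.2.2 + 1
  if n = 3 then
    (if acc ≠ 26 then s.1 ++ [PySem.List.pyGetD alpha acc ' '] else s.1, 0, 0)
  else (s.1, acc, n)

-- the body of 'for ch in plaintext'
def pvStep (alpha : List Char) (p : (List Char × Int × Nat) × Bool) (ch : Char) :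
    (List Char × Int × Nat) × Bool :=
  let s := if p.2 then pvEmit alpha p.1 2 else p.1
  let s := (pvCode ch).foldl (fun s sym => pvEmit alpha s (if sym = '.' then 0 else 1)) s
  (s, true)

-- 'while n: emit(2)' — fuel 3 only makes the loop total (n is always < 3, so it never runs out)
def pvFlushGo (alpha : List Char) : Nat → List Char × Int × Nat → List Char × Int × Nat
  | 0, s => s
  | f + 1, s => if s.2.2 ≠ 0 then pvFlushGo alpha f (pvEmit alpha s 2) else s

-- literal port of B (Source B)
def encrypt_v2_alt (plaintext : String) (key : String) : String :=
  let alpha := PySem.List.dedup (PySem.Chars.upper key.toList ++ pvAsciiUpper)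
  let r := plaintext.toList.foldl (pvStep alpha) (([], 0, 0), false)
  let s := pvFlushGo alpha 3 r.1
  String.mk s.1

-- ===== PRECONDITION & SPEC =====
def Spec_encrypt_v2 (plaintext : String) (key : String) (out : String) : Prop := out = encrypt_v2_alt plaintext key
instance (plaintext : String) (key : String) (out : String) : Decidable (Spec_encrypt_v2 plaintext key out) := by unfold Spec_encrypt_v2; infer_instance

-- ===== CLAIM (what is proved, stated in full; the proofs are below) =====
def Claim_equal_encrypt_v2 : Prop := ∀ (plaintext : String) (key : String), Dom_encrypt_v2 plaintext key → Spec_encrypt_v2 plaintext key (encrypt_v2 plaintext key)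

-- ===== LEMMAS AND PROOFS =====

-- the base-3 digit of a morse symbol (proof-side view of B's emitted digits)
def pvDig (c : Char) : Int := if c = '.' then 0 else if c = '-' then 1 else 2

-- B's emit run over a list of morse symbols
def pvRun (alpha : List Char) (s : List Char × Int × Nat) (cs : List Char) : List Char × Int × Nat :=
  cs.foldl (fun s c => pvEmit alpha s (pvDig c)) s

-- the letter one completed triple contributes
def pvG (alpha : List Char) (a b c : Char) : List Char :=
  if 9 * pvDig a + 3 * pvDig b + pvDig c = 26 then []
  else [PySem.List.pyGetD alpha (9 * pvDig a + 3 * pvDig b + pvDig c) ' ']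

-- str.find for a single-character needle that occurs is the index of its first occurrence
theorem pv_idxOf_cons_ne (x c : Char) (t : List Char) (h : c ≠ x) :
    (x :: t).idxOf c = t.idxOf c + 1 := by
  rw [List.idxOf_cons]
  have hb : (x == c) = false := beq_eq_false_iff_ne.mpr (Ne.symm h)
  simp [hb]

theorem pv_find_go (c : Char) (s : List Char) (n : Nat) (h : c ∈ s) :
    PySem.Chars.find.go [c] s n = ((n + s.idxOf c : Nat) : Int) := by
  induction s generalizing n with
  | nil => simp at h
  | cons hd t ih =>
    rw [PySem.Chars.find.go]
    by_cases hch : c = hd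
    · subst hch
      simp [List.isPrefixOf]
    · have hmem : c ∈ t := by
        rcases List.mem_cons.mp h with h1 | h1
        · exact absurd h1 hch
        · exact h1
      have hpre : ([c].isPrefixOf (hd :: t)) = false := by
        simp [List.isPrefixOf]
        exact hch
      rw [hpre]
      simp only [Bool.false_eq_true, if_false]
      rw [ih (n + 1) hmem]
      rw [pv_idxOf_cons_ne hd c t hch]
      push_cast
      ring

theorem pv_find_singleton (s : List Char) (c : Char) (h : c ∈ s) :
    PySem.Chars.find s [c] = (s.idxOf c : Int) := by
  have := pv_find_go c s 0 h
  simpa [PySem.Chars.find] using this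

-- along set(k) (first-occurrence order) the index of the first occurrence in k is strictly increasing
theorem pv_pairwise_idxOf (l : List Char) :
    List.Pairwise (fun a b => l.idxOf a < l.idxOf b) (PySem.Set.ofList l) := by
  induction l with
  | nil => simp [PySem.Set.ofList]
  | cons x xs ih =>
    rw [PySem.Set.ofList_cons, List.pairwise_cons]
    have hfilter : (PySem.Set.ofList xs).discard x
        = (PySem.Set.ofList xs).filter (fun y => !(y == x)) := rfl
    constructor
    · intro b hb
      rw [hfilter] at hb
      have hbx : b ≠ x := by simpa using (List.of_mem_filter hb)
      rw [List.idxOf_cons_self, pv_idxOf_cons_ne x b xs hbx]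
      omega
    · rw [hfilter]
      have hp := ih.filter (fun y => !(y == x))
      refine hp.imp_of_mem ?_
      intro a b ha hb hr
      have hax : a ≠ x := by simpa using (List.of_mem_filter ha)
      have hbx : b ≠ x := by simpa using (List.of_mem_filter hb)
      rw [pv_idxOf_cons_ne x a xs hax, pv_idxOf_cons_ne x b xs hbx]
      omega

-- _build_key_alphabet: sorted(set(k), key=k.find) is first-occurrence deduplication
theorem pv_alpha_eq (k : List Char) :
    PySem.List.sorted (PySem.Set.ofList k) (fun c => PySem.Chars.find k [c]) false
      = PySem.List.dedup k := by
  have hph : List.Pairwise (fun a b => PySem.Chars.find k [a] < PySem.Chars.find k [b])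
      (PySem.Set.ofList k) := by
    refine (pv_pairwise_idxOf k).imp_of_mem ?_
    intro a b ha hb hr
    have hak : a ∈ k := (PySem.Set.mem_ofList k a).mp ha
    have hbk : b ∈ k := (PySem.Set.mem_ofList k b).mp hb
    rw [pv_find_singleton k a hak, pv_find_singleton k b hbk]
    exact_mod_cast hr
  have := PySem.List.sorted_eq_of_perm_of_pairwise_lt (PySem.Set.ofList k) (PySem.Set.ofList k)
      (fun c => PySem.Chars.find k [c]) (List.Perm.refl _) hph
  exact this

-- "".join
theorem pv_join_nil (xs : List (List Char)) : PySem.Chars.join [] xs = xs.flatten := by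
  induction xs with
  | nil => rfl
  | cons a t ih =>
    cases t with
    | nil => simp [PySem.Chars.join, List.intercalate, List.intersperse]
    | cons b t2 =>
      have hstep : PySem.Chars.join ([] : List Char) (a :: b :: t2)
          = a ++ PySem.Chars.join [] (b :: t2) := by
        simp [PySem.Chars.join, List.intercalate, List.intersperse]
      rw [hstep, ih]
      simp

-- "x".join(f(c) for c in x::xs), head-tail form
theorem pv_join_x_cons (f : Char → List Char) (x : Char) (xs : List Char) :
    PySem.Chars.join ['x'] ((x :: xs).map f)
      = f x ++ xs.flatMap (fun c => 'x' :: f c) := by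
  induction xs generalizing x with
  | nil => simp [PySem.Chars.join, List.intercalate, List.intersperse]
  | cons y ys ih =>
    have hstep : PySem.Chars.join ['x'] (f x :: f y :: ys.map f)
        = f x ++ 'x' :: PySem.Chars.join ['x'] (f y :: ys.map f) := by
      simp [PySem.Chars.join, List.intercalate, List.intersperse]
    simp only [List.map_cons] at *
    rw [hstep, ih y]
    simp

theorem pv_mem_join_x (parts : List (List Char)) (c : Char)
    (h : c ∈ PySem.Chars.join ['x'] parts) : c = 'x' ∨ ∃ p ∈ parts, c ∈ p := by
  induction parts with
  | nil => simp [PySem.Chars.join, List.intercalate, List.intersperse] at h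
  | cons p t ih =>
    cases t with
    | nil =>
      simp [PySem.Chars.join, List.intercalate, List.intersperse] at h
      exact Or.inr ⟨p, by simp, h⟩
    | cons q t2 =>
      have hstep : PySem.Chars.join ['x'] (p :: q :: t2)
          = p ++ 'x' :: PySem.Chars.join ['x'] (q :: t2) := by
        simp [PySem.Chars.join, List.intercalate, List.intersperse]
      rw [hstep] at h
      rcases List.mem_append.mp h with h1 | h1
      · exact Or.inr ⟨p, by simp, h1⟩
      · rcases List.mem_cons.mp h1 with h2 | h2
        · exact Or.inl h2
        · rcases ih h2 with h3 | ⟨pp, hpp, hcc⟩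
          · exact Or.inl h3
          · exact Or.inr ⟨pp, by simp [hpp], hcc⟩

-- every morse code consists of '.' and '-'
theorem pv_code_val (ch : Char) (c : Char) (h : c ∈ pvCode ch) :
    c = '.' ∨ c = '-' := by
  unfold pvCode at h
  rcases hq : pvMorseDict.get? (PySem.Chars.upper [ch]) with _ | v
  · rw [PySem.Dict.getD, hq] at h
    simp at h
  · rw [PySem.Dict.getD, hq] at h
    simp only [Option.getD_some] at h
    have hfind : ∃ pr ∈ pvMorseDict.items, pr.2 = v := by
      unfold PySem.Dict.get? at hq
      rcases Option.map_eq_some_iff.mp hq with ⟨pr, hpr, hv⟩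
      exact ⟨pr, List.mem_of_find?_eq_some hpr, hv⟩
    obtain ⟨pr, hprmem, rfl⟩ := hfind
    have hbool : pvMorseDict.items.all (fun pr => pr.2.all (fun c2 => c2 == '.' || c2 == '-')) = true := by decide
    have h1 := List.all_eq_true.mp hbool pr hprmem
    have h2 := List.all_eq_true.mp h1 c h
    simpa using h2

theorem pv_morse_chars (p : List Char) (c : Char) (h : c ∈ pvToMorse p) :
    c = '.' ∨ c = '-' ∨ c = 'x' := by
  unfold pvToMorse at h
  rcases pv_mem_join_x _ c h with h1 | ⟨part, hpart, hcp⟩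
  · exact Or.inr (Or.inr h1)
  · rcases List.mem_map.mp hpart with ⟨ch, _, rfl⟩
    rcases pv_code_val ch c hcp with h2 | h2
    · exact Or.inl h2
    · exact Or.inr (Or.inl h2)

-- assoc-list dict built by inserting pairwise-distinct keys
theorem pv_get?_foldl_ne (pairs : List (Char × List Char))
    (d : PySem.Dict (List Char) (List Char)) (kk : List Char)
    (h : ∀ p ∈ pairs, p.2 ≠ kk) :
    (pairs.foldl (fun d p => d.insert p.2 [p.1]) d).get? kk = d.get? kk := by
  induction pairs generalizing d with
  | nil => rfl
  | cons p0 rest ih =>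
    simp only [List.foldl_cons]
    rw [ih _ (fun p hp => h p (List.mem_cons_of_mem _ hp))]
    exact PySem.Dict.get?_insert_of_ne d _ (h p0 (List.mem_cons_self ..)).symm

theorem pv_get?_foldl_mem (pairs : List (Char × List Char))
    (d : PySem.Dict (List Char) (List Char)) (v : Char) (kk : List Char)
    (hnd : (pairs.map Prod.snd).Nodup) (hmem : (v, kk) ∈ pairs) :
    (pairs.foldl (fun d p => d.insert p.2 [p.1]) d).get? kk = some [v] := by
  induction pairs generalizing d with
  | nil => simp at hmem
  | cons p0 rest ih =>
    simp only [List.map_cons, List.nodup_cons] at hnd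
    rcases List.mem_cons.mp hmem with rfl | hmem2
    · simp only [List.foldl_cons]
      rw [pv_get?_foldl_ne rest _ kk ?_]
      · exact PySem.Dict.get?_insert_self d kk [v]
      · intro p hp he
        have hmm : p.2 ∈ rest.map Prod.snd := List.mem_map_of_mem (f := Prod.snd) hp
        exact hnd.1 (he ▸ hmm)
    · simp only [List.foldl_cons]
      exact ih _ hnd.2 hmem2

theorem pv_zip_snd_sublist (l1 : List Char) (l2 : List (List Char)) :
    ((l1.zip l2).map Prod.snd).Sublist l2 := by
  induction l1 generalizing l2 with
  | nil => simp
  | cons a t ih =>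
    cases l2 with
    | nil => simp
    | cons b t2 =>
      simpa using (ih t2).cons₂ b

-- the key alphabet contains the 26 letters, so it has at least 26 characters
theorem pv_alpha_len (k : List Char) :
    26 ≤ (PySem.Set.ofList (k ++ pvAsciiUpper)).length := by
  have hsub : pvAsciiUpper.toFinset ⊆ (PySem.Set.ofList (k ++ pvAsciiUpper)).toFinset := by
    intro a ha
    rw [List.mem_toFinset] at *
    rw [PySem.Set.mem_ofList]
    exact List.mem_append_right _ ha
  have h1 : pvAsciiUpper.toFinset.card = 26 := by decide
  have h2 := Finset.card_le_card hsub
  have h3 := List.toFinset_card_le (PySem.Set.ofList (k ++ pvAsciiUpper))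
  omega

theorem pv_tmap_get (alpha : List Char) (h26 : 26 ≤ alpha.length) (j : Nat) (hj : j < 26)
    (combo : List Char) (hcombo : pvCombos[j]? = some combo) (hne : combo ≠ ['x', 'x', 'x']) :
    PySem.Dict.getD (((alpha.zip pvCombos).foldl (fun d p => d.insert p.2 [p.1])
        (⟨[]⟩ : PySem.Dict (List Char) (List Char))).insert ['x', 'x', 'x'] []) combo []
      = [PySem.List.pyGetD alpha (j : Int) ' '] := by
  have hj27 : j < pvCombos.length := by
    have : pvCombos.length = 27 := by decide
    omega
  have hja : j < alpha.length := by omega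
  have hcombo' : pvCombos[j] = combo := by
    have := List.getElem?_eq_some_iff.mp hcombo
    rcases this with ⟨hh, he⟩
    exact he
  have hmem : (alpha[j], combo) ∈ alpha.zip pvCombos := by
    have hlen : j < (alpha.zip pvCombos).length := by
      rw [List.length_zip]
      omega
    have := List.getElem_zip (l := alpha) (l' := pvCombos) (i := j) (h := hlen)
    rw [hcombo'] at this
    rw [← this]
    exact List.getElem_mem hlen
  have hnd : ((alpha.zip pvCombos).map Prod.snd).Nodup := by
    have hcnd : pvCombos.Nodup := by decide
    exact (pv_zip_snd_sublist alpha pvCombos).nodup hcnd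
  rw [PySem.Dict.getD]
  rw [PySem.Dict.get?_insert_of_ne _ _ hne]
  rw [pv_get?_foldl_mem _ _ _ _ hnd hmem]
  rw [Option.getD_some]
  rw [PySem.List.pyGetD_eq_getElem alpha ' ' (by exact_mod_cast Nat.zero_le j) (by exact_mod_cast hja)]
  simp

-- t_map lookup of a 3-char group = the letter B's completed triple emits
theorem pv_tmap_getD (alpha : List Char) (h26 : 26 ≤ alpha.length) (a b c : Char)
    (ha : a = '.' ∨ a = '-' ∨ a = 'x') (hb : b = '.' ∨ b = '-' ∨ b = 'x')
    (hc : c = '.' ∨ c = '-' ∨ c = 'x') :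
    PySem.Dict.getD (((alpha.zip pvCombos).foldl (fun d p => d.insert p.2 [p.1])
        (⟨[]⟩ : PySem.Dict (List Char) (List Char))).insert ['x', 'x', 'x'] []) [a, b, c] []
      = pvG alpha a b c := by
  rcases ha with rfl | rfl | rfl <;> rcases hb with rfl | rfl | rfl <;> rcases hc with rfl | rfl | rfl
  · simpa [pvG, pvDig] using pv_tmap_get alpha h26 0 (by norm_num) ['.', '.', '.'] (by rfl) (by decide)
  · simpa [pvG, pvDig] using pv_tmap_get alpha h26 1 (by norm_num) ['.', '.', '-'] (by rfl) (by decide)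
  · simpa [pvG, pvDig] using pv_tmap_get alpha h26 2 (by norm_num) ['.', '.', 'x'] (by rfl) (by decide)
  · simpa [pvG, pvDig] using pv_tmap_get alpha h26 3 (by norm_num) ['.', '-', '.'] (by rfl) (by decide)
  · simpa [pvG, pvDig] using pv_tmap_get alpha h26 4 (by norm_num) ['.', '-', '-'] (by rfl) (by decide)
  · simpa [pvG, pvDig] using pv_tmap_get alpha h26 5 (by norm_num) ['.', '-', 'x'] (by rfl) (by decide)
  · simpa [pvG, pvDig] using pv_tmap_get alpha h26 6 (by norm_num) ['.', 'x', '.'] (by rfl) (by decide)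
  · simpa [pvG, pvDig] using pv_tmap_get alpha h26 7 (by norm_num) ['.', 'x', '-'] (by rfl) (by decide)
  · simpa [pvG, pvDig] using pv_tmap_get alpha h26 8 (by norm_num) ['.', 'x', 'x'] (by rfl) (by decide)
  · simpa [pvG, pvDig] using pv_tmap_get alpha h26 9 (by norm_num) ['-', '.', '.'] (by rfl) (by decide)
  · simpa [pvG, pvDig] using pv_tmap_get alpha h26 10 (by norm_num) ['-', '.', '-'] (by rfl) (by decide)
  · simpa [pvG, pvDig] using pv_tmap_get alpha h26 11 (by norm_num) ['-', '.', 'x'] (by rfl) (by decide)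
  · simpa [pvG, pvDig] using pv_tmap_get alpha h26 12 (by norm_num) ['-', '-', '.'] (by rfl) (by decide)
  · simpa [pvG, pvDig] using pv_tmap_get alpha h26 13 (by norm_num) ['-', '-', '-'] (by rfl) (by decide)
  · simpa [pvG, pvDig] using pv_tmap_get alpha h26 14 (by norm_num) ['-', '-', 'x'] (by rfl) (by decide)
  · simpa [pvG, pvDig] using pv_tmap_get alpha h26 15 (by norm_num) ['-', 'x', '.'] (by rfl) (by decide)
  · simpa [pvG, pvDig] using pv_tmap_get alpha h26 16 (by norm_num) ['-', 'x', '-'] (by rfl) (by decide)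
  · simpa [pvG, pvDig] using pv_tmap_get alpha h26 17 (by norm_num) ['-', 'x', 'x'] (by rfl) (by decide)
  · simpa [pvG, pvDig] using pv_tmap_get alpha h26 18 (by norm_num) ['x', '.', '.'] (by rfl) (by decide)
  · simpa [pvG, pvDig] using pv_tmap_get alpha h26 19 (by norm_num) ['x', '.', '-'] (by rfl) (by decide)
  · simpa [pvG, pvDig] using pv_tmap_get alpha h26 20 (by norm_num) ['x', '.', 'x'] (by rfl) (by decide)
  · simpa [pvG, pvDig] using pv_tmap_get alpha h26 21 (by norm_num) ['x', '-', '.'] (by rfl) (by decide)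
  · simpa [pvG, pvDig] using pv_tmap_get alpha h26 22 (by norm_num) ['x', '-', '-'] (by rfl) (by decide)
  · simpa [pvG, pvDig] using pv_tmap_get alpha h26 23 (by norm_num) ['x', '-', 'x'] (by rfl) (by decide)
  · simpa [pvG, pvDig] using pv_tmap_get alpha h26 24 (by norm_num) ['x', 'x', '.'] (by rfl) (by decide)
  · simpa [pvG, pvDig] using pv_tmap_get alpha h26 25 (by norm_num) ['x', 'x', '-'] (by rfl) (by decide)
  · simp [pvG, pvDig, PySem.Dict.getD_insert]

theorem pv_pyRange3 (k : Nat) :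
    PySem.List.pyRange 0 ((3 * k : Nat) : Int) 3 = (List.range k).map (fun j => ((3 * j : Nat) : Int)) := by
  cases k with
  | zero => simp [PySem.List.pyRange]
  | succ m =>
    have hpos : (0 : Int) < ((3 * (m + 1) : Nat) : Int) := by positivity
    have hcount : ((((3 * (m + 1) : Nat) : Int) - 0 + 3 - 1) / 3).toNat = m + 1 := by
      have h1 : (((3 * (m + 1) : Nat) : Int) - 0 + 3 - 1) = ((3 * m + 5 : Nat) : Int) := by
        push_cast
        ring
      rw [h1, show ((3 : Int)) = ((3 : Nat) : Int) from rfl, ← Int.natCast_ediv]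
      omega
    simp only [PySem.List.pyRange, if_neg (by norm_num : ¬(3 : Int) = 0), if_pos (by norm_num : (0 : Int) < 3),
      if_pos hpos, hcount]
    apply List.map_congr_left
    intro j _
    push_cast
    ring

-- the consecutive 3-char groups of a list
def pvTriples : List Char → List (Char × Char × Char)
  | a :: b :: c :: rest => (a, b, c) :: pvTriples rest
  | _ => []

theorem pv_mem_triples : ∀ (l : List Char) (t : Char × Char × Char), t ∈ pvTriples l →
    t.1 ∈ l ∧ t.2.1 ∈ l ∧ t.2.2 ∈ l
  | [], t, h => by simp [pvTriples] at h
  | [a], t, h => by simp [pvTriples] at h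
  | [a, b], t, h => by simp [pvTriples] at h
  | a :: b :: c :: rest, t, h => by
    rcases List.mem_cons.mp (by simpa [pvTriples] using h) with rfl | hmem
    · simp
    · obtain ⟨h1, h2, h3⟩ := pv_mem_triples rest t hmem
      exact ⟨by simp [h1], by simp [h2], by simp [h3]⟩

-- A's chunk loop, indexed form = structural form
theorem pv_chunks (F : List Char → List Char) :
    ∀ (k : Nat) (l : List Char), l.length = 3 * k →
      ((List.range k).map (fun j => F ((l.drop (3 * j)).take 3))).flatten
        = (pvTriples l).flatMap (fun t => F [t.1, t.2.1, t.2.2]) := by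
  intro k
  induction k with
  | zero =>
    intro l hl
    have hnil : l = [] := List.eq_nil_of_length_eq_zero (by omega)
    subst hnil
    simp [pvTriples]
  | succ m ih =>
    intro l hl
    rcases l with _ | ⟨a, _ | ⟨b, _ | ⟨c, rest⟩⟩⟩
    · simp at hl <;> omega
    · simp at hl <;> omega
    · simp at hl <;> omega
    · have hrest : rest.length = 3 * m := by
        simp at hl
        omega
      have hdrop : ∀ j : Nat, (a :: b :: c :: rest).drop (3 * (j + 1)) = rest.drop (3 * j) := by
        intro j
        rw [show 3 * (j + 1) = 3 + 3 * j from by ring, ← List.drop_drop]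
        rfl
      rw [List.range_succ_eq_map, List.map_cons, List.map_map, List.flatten_cons]
      have hhd : ((a :: b :: c :: rest).drop (3 * 0)).take 3 = [a, b, c] := by simp
      rw [hhd]
      have htl : (List.range m).map ((fun j => F (((a :: b :: c :: rest).drop (3 * j)).take 3)) ∘ Nat.succ)
          = (List.range m).map (fun j => F ((rest.drop (3 * j)).take 3)) := by
        apply List.map_congr_left
        intro j _
        simp only [Function.comp, Nat.succ_eq_add_one, hdrop]
      rw [htl, ih rest hrest]
      simp [pvTriples]

-- ------- B-side lemmas -------

theorem pv_run_append (alpha : List Char) (s : List Char × Int × Nat) (l1 l2 : List Char) :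
    pvRun alpha s (l1 ++ l2) = pvRun alpha (pvRun alpha s l1) l2 := by
  unfold pvRun
  exact List.foldl_append

-- B's inner for-loop over a morse code = pvRun (the code has only '.' and '-')
theorem pv_run_code (alpha : List Char) (ch : Char) (s : List Char × Int × Nat) :
    (pvCode ch).foldl (fun s sym => pvEmit alpha s (if sym = '.' then 0 else 1)) s
      = pvRun alpha s (pvCode ch) := by
  have hgen : ∀ (cs : List Char), (∀ c ∈ cs, c = '.' ∨ c = '-') → ∀ s,
      cs.foldl (fun s sym => pvEmit alpha s (if sym = '.' then 0 else 1)) s = pvRun alpha s cs := by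
    intro cs hcs
    induction cs with
    | nil => intro s; rfl
    | cons c rest ih =>
      intro s
      simp only [List.foldl_cons, pvRun]
      have hd : (if c = '.' then (0 : Int) else 1) = pvDig c := by
        rcases hcs c (by simp) with rfl | rfl <;> simp [pvDig]
      rw [hd]
      have := ih (fun c2 h2 => hcs c2 (by simp [h2])) (pvEmit alpha s (pvDig c))
      simpa [pvRun] using this
  exact hgen (pvCode ch) (pv_code_val ch) s

-- B's main loop after the first character
theorem pv_fold_true (alpha : List Char) (cs : List Char) (s : List Char × Int × Nat) :
    cs.foldl (pvStep alpha) (s, true)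
      = (pvRun alpha s (cs.flatMap (fun c => 'x' :: pvCode c)), true) := by
  induction cs generalizing s with
  | nil => simp [pvRun]
  | cons c rest ih =>
    simp only [List.foldl_cons]
    have hstep : pvStep alpha (s, true) c = (pvRun alpha s ('x' :: pvCode c), true) := by
      unfold pvStep
      simp only [if_pos]
      rw [pv_run_code]
      have : pvRun alpha s ('x' :: pvCode c) = pvRun alpha (pvEmit alpha s 2) (pvCode c) := by
        simp [pvRun, pvDig]
      rw [this]
    rw [hstep, ih]
    rw [List.flatMap_cons, pv_run_append]

-- B's main loop = pvRun over the (never materialised) morse string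
theorem pv_fold_main (alpha : List Char) (p : List Char) :
    (p.foldl (pvStep alpha) (([], 0, 0), false)).1 = pvRun alpha ([], 0, 0) (pvToMorse p) := by
  cases p with
  | nil => simp [pvRun, pvToMorse, PySem.Chars.join, List.intercalate, List.intersperse]
  | cons c cs =>
    simp only [List.foldl_cons]
    have hstep : pvStep alpha (([], 0, 0), false) c = (pvRun alpha ([], 0, 0) (pvCode c), true) := by
      unfold pvStep
      simp only [Bool.false_eq_true, if_false]
      rw [pv_run_code]
    rw [hstep, pv_fold_true]
    rw [pvToMorse, pv_join_x_cons, pv_run_append]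

-- pending-digit count after a run from a state with n < 3
theorem pv_run_n (alpha : List Char) (cs : List Char) (s : List Char × Int × Nat) (h : s.2.2 < 3) :
    (pvRun alpha s cs).2.2 = (s.2.2 + cs.length) % 3 := by
  induction cs generalizing s with
  | nil =>
    simp only [pvRun, List.foldl_nil, List.length_nil]
    omega
  | cons c rest ih =>
    have hemit : (pvEmit alpha s (pvDig c)).2.2 = (s.2.2 + 1) % 3 := by
      unfold pvEmit
      by_cases h3 : s.2.2 + 1 = 3
      · simp [h3]
      · simp only [h3, if_false]
        omega
    have hlt : (pvEmit alpha s (pvDig c)).2.2 < 3 := by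
      rw [hemit]; omega
    have := ih (pvEmit alpha s (pvDig c)) hlt
    simp only [pvRun, List.foldl_cons] at *
    rw [this, hemit]
    simp only [List.length_cons]
    omega

-- the flush loop pads the pending group with 'x' digits
theorem pv_flush_eq (alpha : List Char) (s : List Char × Int × Nat) (h : s.2.2 < 3) :
    pvFlushGo alpha 3 s = pvRun alpha s (List.replicate ((3 - s.2.2) % 3) 'x') := by
  obtain ⟨out, acc, n⟩ := s
  simp only at h
  interval_cases n
  · simp [pvFlushGo, pvRun]
  · simp [pvFlushGo, pvRun, pvEmit, pvDig, List.replicate]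
  · simp [pvFlushGo, pvRun, pvEmit, pvDig, List.replicate]

-- a run from a clean state over a multiple of 3 emits one pvG letter per triple
theorem pv_run_triples (alpha : List Char) :
    ∀ (k : Nat) (l : List Char) (out : List Char), l.length = 3 * k →
      pvRun alpha (out, 0, 0) l
        = (out ++ (pvTriples l).flatMap (fun t => pvG alpha t.1 t.2.1 t.2.2), 0, 0) := by
  intro k
  induction k with
  | zero =>
    intro l out hl
    have hnil : l = [] := List.eq_nil_of_length_eq_zero (by omega)
    subst hnil
    simp [pvRun, pvTriples]
  | succ m ih =>
    intro l out hl
    rcases l with _ | ⟨a, _ | ⟨b, _ | ⟨c, rest⟩⟩⟩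
    · simp at hl <;> omega
    · simp at hl <;> omega
    · simp at hl <;> omega
    · have hrest : rest.length = 3 * m := by
        simp at hl
        omega
      have hval : (pvDig a * 3 + pvDig b) * 3 + pvDig c
          = 9 * pvDig a + 3 * pvDig b + pvDig c := by ring
      have hstep : pvRun alpha (out, 0, 0) (a :: b :: c :: rest)
          = pvRun alpha (out ++ pvG alpha a b c, 0, 0) rest := by
        simp only [pvRun, List.foldl_cons]
        congr 1
        show pvEmit alpha (pvEmit alpha (pvEmit alpha (out, 0, 0) (pvDig a)) (pvDig b)) (pvDig c)
            = (out ++ pvG alpha a b c, 0, 0)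
        simp only [pvEmit, pvG]
        norm_num
        rw [hval]
        by_cases h26 : 9 * pvDig a + 3 * pvDig b + pvDig c = 26 <;> simp [h26]
      rw [hstep, ih rest _ hrest]
      simp [pvTriples]

-- ===== VERDICT (by name: the statement is the Claim_ definition above) =====
theorem encrypt_v2_spec : Claim_equal_encrypt_v2 := by
  intro p key _
  unfold Spec_encrypt_v2
  simp only [encrypt_v2, encrypt_v2_alt]
  rw [pv_alpha_eq]
  set K := PySem.Chars.upper key.toList ++ pvAsciiUpper with hK
  set alpha := PySem.List.dedup K with halpha
  set m := pvToMorse p.toList with hm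
  set pad := PySem.Int.mod (-(m.length : Int)) 3 with hpad
  set m2 := m ++ PySem.List.pyRepeat ['x'] pad with hm2
  -- the two pads coincide
  have hpadval : pad = (-(m.length : Int)) % 3 := by
    rw [hpad, PySem.Int.mod_eq_emod_of_pos (by norm_num)]
  have hpadnat : pad.toNat = (3 - m.length % 3) % 3 := by
    have h0 : (0 : Int) ≤ (-(m.length : Int)) % 3 := Int.emod_nonneg _ (by norm_num)
    have h1 : (-(m.length : Int)) % 3 < 3 := Int.emod_lt_of_pos _ (by norm_num)
    have h2 : ((-(m.length : Int)) % 3 + (m.length : Int)) % 3 = 0 := by omega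
    omega
  have hrepl : PySem.List.pyRepeat ['x'] pad = List.replicate ((3 - m.length % 3) % 3) 'x' := by
    rw [PySem.List.pyRepeat_singleton, hpadnat]
  have hlen2 : m2.length = m.length + (3 - m.length % 3) % 3 := by
    rw [hm2, hrepl, List.length_append, List.length_replicate]
  have hdvd : ∃ k0 : Nat, m2.length = 3 * k0 := ⟨m2.length / 3, by rw [hlen2]; omega⟩
  obtain ⟨k0, hk0⟩ := hdvd
  have h26 : 26 ≤ alpha.length := by
    rw [halpha, hK, PySem.List.dedup_eq_ofList]
    exact pv_alpha_len (PySem.Chars.upper key.toList)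
  -- characters of the padded morse string
  have hchars : ∀ ch ∈ m2, ch = '.' ∨ ch = '-' ∨ ch = 'x' := by
    intro ch hch
    rcases List.mem_append.mp hch with h1 | h1
    · exact pv_morse_chars p.toList ch h1
    · rw [hrepl] at h1
      exact Or.inr (Or.inr (List.eq_of_mem_replicate h1))
  -- A side: fold → map → flatten → flatMap over triples
  rw [PySem.List.foldl_append_singleton_eq_map
    (f := fun i => PySem.Dict.getD
      (((alpha.zip pvCombos).foldl (fun d pr => d.insert pr.2 [pr.1])
        (⟨[]⟩ : PySem.Dict (List Char) (List Char))).insert ['x', 'x', 'x'] [])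
      (PySem.List.slice m2 (some i) (some (i + 3))) [])]
  rw [List.nil_append, pv_join_nil]
  have hrange : PySem.List.pyRange 0 ((m2.length : Nat) : Int) 3
      = (List.range k0).map (fun j => ((3 * j : Nat) : Int)) := by
    rw [hk0]
    exact pv_pyRange3 k0
  rw [hrange, List.map_map]
  have hsl : ((List.range k0).map ((fun i => PySem.Dict.getD
      (((alpha.zip pvCombos).foldl (fun d pr => d.insert pr.2 [pr.1])
        (⟨[]⟩ : PySem.Dict (List Char) (List Char))).insert ['x', 'x', 'x'] [])
      (PySem.List.slice m2 (some i) (some (i + 3))) []) ∘ (fun j => ((3 * j : Nat) : Int))))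
      = (List.range k0).map (fun j => PySem.Dict.getD
      (((alpha.zip pvCombos).foldl (fun d pr => d.insert pr.2 [pr.1])
        (⟨[]⟩ : PySem.Dict (List Char) (List Char))).insert ['x', 'x', 'x'] [])
      ((m2.drop (3 * j)).take 3) []) := by
    apply List.map_congr_left
    intro j _
    simp only [Function.comp]
    congr 1
    have hc : ((3 * j : Nat) : Int) + 3 = ((3 * j + 3 : Nat) : Int) := by push_cast; ring
    rw [hc, PySem.List.slice_natCast]
    congr 1
    omega
  rw [hsl]
  rw [pv_chunks (fun s => PySem.Dict.getD
      (((alpha.zip pvCombos).foldl (fun d pr => d.insert pr.2 [pr.1])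
        (⟨[]⟩ : PySem.Dict (List Char) (List Char))).insert ['x', 'x', 'x'] []) s []) k0 m2 hk0]
  -- B side: main fold, then flush, then the triple run
  rw [pv_fold_main]
  have hn : (pvRun alpha ([], 0, 0) m).2.2 = m.length % 3 := by
    have := pv_run_n alpha m (([], 0, 0) : List Char × Int × Nat) (by norm_num)
    simpa using this
  have hnlt : (pvRun alpha ([], 0, 0) m).2.2 < 3 := by rw [hn]; omega
  rw [pv_flush_eq alpha _ hnlt, hn, ← pv_run_append]
  have hm2' : m ++ List.replicate ((3 - m.length % 3) % 3) 'x' = m2 := by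
    rw [hm2, hrepl]
  rw [hm2', pv_run_triples alpha k0 m2 [] hk0]
  simp only [List.nil_append]
  -- pointwise equality of the two flatMaps
  congr 1
  rw [List.flatMap_def, List.flatMap_def]
  congr 1
  apply List.map_congr_left
  intro t ht
  obtain ⟨h1, h2, h3⟩ := pv_mem_triples m2 t ht
  exact pv_tmap_getD alpha h26 t.1 t.2.1 t.2.2 (hchars _ h1) (hchars _ h2) (hchars _ h3)
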